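-- pv_equiv track=rewrite | github.com/EyupKeremBas7/server-client | Klasik_Kripto/route.py | route_sifrele
-- ===== SOURCE A (Python) =====
-- def route_sifrele(metin, satir_sayisi, sutun_sayisi):
--     """
--     Route Cipher - Şifreleme
--     Metin matrise yazılır ve spiral şeklinde okunur
--     """
--     # Metni tamamla
--     toplam = satir_sayisi * sutun_sayisi
--     dolgu = toplam - len(metin)
--     if dolgu > 0:
--         metin += 'X' * dolgu
--
--     # Matrisi oluştur
--     matris = []
--     index = 0
--     for i in range(satir_sayisi):
--         satir = []
--         for j in range(sutun_sayisi):
--             if index < len(metin):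
--                 satir.append(metin[index])
--                 index += 1
--             else:
--                 satir.append('X')
--         matris.append(satir)
--
--     # Spiral okuma (saat yönünde, dıştan içe)
--     sifreli_metin = ""
--     ust, alt = 0, satir_sayisi - 1
--     sol, sag = 0, sutun_sayisi - 1
--
--     while ust <= alt and sol <= sag:
--         # Üst satır (soldan sağa)
--         for i in range(sol, sag + 1):
--             sifreli_metin += matris[ust][i]
--         ust += 1
--
--         # Sağ sütun (yukarıdan aşağıya)
--         for i in range(ust, alt + 1):
--             sifreli_metin += matris[i][sag]
--         sag -= 1
--
--         # Alt satır (sağdan sola)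
--         if ust <= alt:
--             for i in range(sag, sol - 1, -1):
--                 sifreli_metin += matris[alt][i]
--             alt -= 1
--
--         # Sol sütun (aşağıdan yukarıya)
--         if sol <= sag:
--             for i in range(alt, ust - 1, -1):
--                 sifreli_metin += matris[i][sol]
--             sol += 1
--
--     return sifreli_metin
-- ===== SOURCE B (Python) =====
-- def route_sifrele(metin, satir_sayisi, sutun_sayisi):
--     """Route cipher via peel-and-rotate: emit the first row, rotate the rest
--     counter-clockwise, repeat -- no boundary pointers."""
--     if satir_sayisi <= 0 or sutun_sayisi <= 0:
--         return ""
--     toplam = satir_sayisi * sutun_sayisi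
--     dolu = (metin + 'X' * toplam)[:toplam]
--     matris = [list(dolu[i * sutun_sayisi:(i + 1) * sutun_sayisi])
--               for i in range(satir_sayisi)]
--     parcalar = []
--     while matris:
--         ilk = matris[0]
--         kalan = matris[1:]
--         parcalar.extend(ilk)
--         if kalan:
--             n = len(kalan[0])
--             matris = [[r[n - 1 - k] for r in kalan] for k in range(n)]
--         else:
--             matris = []
--     return ''.join(parcalar)
-- ===== Notes on version B (the rewrite author's own statement) =====
-- stated objective: alternative
-- what changed: Replaced the four-boundary-pointer spiral walk with a peel-and-rotate loop: emit the first row, rotate the remaining matrix 90 degrees counter-clockwise, repeat until empty.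
import Mathlib
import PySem

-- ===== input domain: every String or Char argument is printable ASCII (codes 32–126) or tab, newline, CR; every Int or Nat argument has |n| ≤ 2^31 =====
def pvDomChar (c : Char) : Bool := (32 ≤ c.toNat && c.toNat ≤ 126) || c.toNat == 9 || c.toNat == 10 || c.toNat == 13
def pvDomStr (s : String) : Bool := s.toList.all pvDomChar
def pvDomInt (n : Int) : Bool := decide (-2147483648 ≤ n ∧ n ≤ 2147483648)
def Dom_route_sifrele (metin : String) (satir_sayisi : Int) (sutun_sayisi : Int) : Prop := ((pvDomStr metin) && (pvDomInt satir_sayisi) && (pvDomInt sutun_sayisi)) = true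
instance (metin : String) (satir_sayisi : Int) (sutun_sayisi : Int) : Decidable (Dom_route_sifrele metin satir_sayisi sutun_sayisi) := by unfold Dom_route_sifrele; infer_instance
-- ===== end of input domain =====

-- B replaces A's four-boundary-pointer spiral walk by a peel-and-rotate loop
-- (emit the first row, rotate the rest counter-clockwise, repeat); objective: alternative.

-- ===== PORT A =====
-- A's while-loop over the four boundary pointers; it runs at most min(satir,sutun)
-- iterations, so the fuel (satir+sutun).toNat is never exhausted.
-- matris[ust][i] / metin[index] are ported with pyGetD: while the loop condition
-- holds those indices are always in range (Python would raise otherwise).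

def spiralALoop (fuel : Nat) (matris : List (List Char)) (ust alt sol sag : Int) (acc : List Char) : List Char :=
  match fuel with
  | 0 => acc
  | fuel + 1 =>
    if ust ≤ alt ∧ sol ≤ sag then
      let acc1 := acc ++ (PySem.List.pyRange sol (sag + 1) 1).map
        (fun i => PySem.List.pyGetD (PySem.List.pyGetD matris ust []) i 'X')
      let ust1 := ust + 1
      let acc2 := acc1 ++ (PySem.List.pyRange ust1 (alt + 1) 1).map
        (fun i => PySem.List.pyGetD (PySem.List.pyGetD matris i []) sag 'X')
      let sag1 := sag - 1
      let p3 := if ust1 ≤ alt then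
          (acc2 ++ (PySem.List.pyRange sag1 (sol - 1) (-1)).map
            (fun i => PySem.List.pyGetD (PySem.List.pyGetD matris alt []) i 'X'), alt - 1)
        else (acc2, alt)
      let p4 := if sol ≤ sag1 then
          (p3.1 ++ (PySem.List.pyRange p3.2 (ust1 - 1) (-1)).map
            (fun i => PySem.List.pyGetD (PySem.List.pyGetD matris i []) sol 'X'), sol + 1)
        else (p3.1, sol)
      spiralALoop fuel matris ust1 p3.2 p4.2 sag1 p4.1
    else acc

def route_sifrele (metin : String) (satir_sayisi : Int) (sutun_sayisi : Int) : String :=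
  let toplam := satir_sayisi * sutun_sayisi
  let metinL := metin.toList
  let dolgu : Int := toplam - (metinL.length : Int)
  let m : List Char := if dolgu > 0 then metinL ++ List.replicate dolgu.toNat 'X' else metinL
  let build := (PySem.List.pyRange 0 satir_sayisi 1).foldl
    (fun (st : List (List Char) × Int) _i =>
      let inner := (PySem.List.pyRange 0 sutun_sayisi 1).foldl
        (fun (st2 : List Char × Int) _j =>
          if st2.2 < (m.length : Int) then (st2.1 ++ [PySem.List.pyGetD m st2.2 'X'], st2.2 + 1)
          else (st2.1 ++ ['X'], st2.2))
        ([], st.2)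
      (st.1 ++ [inner.1], inner.2))
    ([], (0 : Int))
  String.ofList (spiralALoop (satir_sayisi + sutun_sayisi).toNat build.1 0 (satir_sayisi - 1) 0 (sutun_sayisi - 1) [])

-- ===== PORT B =====
-- Source B's rotation [[r[n-1-k] for r in kalan] for k in range(n)] (indices always in
-- range on the rectangular matrices built here; Python would raise otherwise).

def rotCCW (kalan : List (List Char)) : List (List Char) :=
  match kalan with
  | [] => []
  | r0 :: _ =>
    (List.range r0.length).map (fun k => kalan.map (fun r => r.getD (r0.length - 1 - k) 'X'))

-- Source B's `while matris:` loop; it runs at most satir+sutun times, so that fuel suffices.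

def spiralBLoop (fuel : Nat) (matris : List (List Char)) (acc : List Char) : List Char :=
  match fuel, matris with
  | 0, _ => acc
  | _ + 1, [] => acc
  | fuel + 1, ilk :: kalan => spiralBLoop fuel (rotCCW kalan) (acc ++ ilk)

def route_sifrele_alt (metin : String) (satir_sayisi : Int) (sutun_sayisi : Int) : String :=
  if satir_sayisi ≤ 0 ∨ sutun_sayisi ≤ 0 then "" else
  let toplam := satir_sayisi * sutun_sayisi
  let dolu := PySem.List.slice (metin.toList ++ List.replicate toplam.toNat 'X') none (some toplam)
  let matris := (PySem.List.pyRange 0 satir_sayisi 1).map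
    (fun i => PySem.List.slice dolu (some (i * sutun_sayisi)) (some ((i + 1) * sutun_sayisi)))
  String.ofList (spiralBLoop (satir_sayisi + sutun_sayisi).toNat matris [])

-- ===== PRECONDITION & SPEC =====
def Spec_route_sifrele (metin : String) (satir_sayisi : Int) (sutun_sayisi : Int) (out : String) : Prop := out = route_sifrele_alt metin satir_sayisi sutun_sayisi
instance (metin : String) (satir_sayisi : Int) (sutun_sayisi : Int) (out : String) : Decidable (Spec_route_sifrele metin satir_sayisi sutun_sayisi out) := by unfold Spec_route_sifrele; infer_instance

-- ===== CLAIM (what is proved, stated in full; the proofs are below) =====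
def Claim_equal_route_sifrele : Prop := ∀ (metin : String) (satir_sayisi : Int) (sutun_sayisi : Int), Dom_route_sifrele metin satir_sayisi sutun_sayisi → Spec_route_sifrele metin satir_sayisi sutun_sayisi (route_sifrele metin satir_sayisi sutun_sayisi)

-- ===== LEMMAS AND PROOFS =====
-- Both spirals are reduced to a common index sequence pvSpiralIdx over affine
-- "grid" matrices (entry (i,j) = f (a + i*dr + j*dc)).

def pvGrid (f : Int → Char) (a dr dc : Int) (m n : Nat) : List (List Char) :=
  (List.range m).map (fun (i : Nat) => (List.range n).map (fun (j : Nat) => f (a + (i : Int) * dr + (j : Int) * dc)))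

def pvSpiralIdx (a dr dc : Int) (m n : Nat) : List Int :=
  if m = 0 ∨ n = 0 then []
  else ((List.range n).map (fun (j : Nat) => a + (j : Int) * dc)) ++
    pvSpiralIdx (a + dr + ((n : Int) - 1) * dc) (-dc) dr n (m - 1)
termination_by m + n
decreasing_by simp_all; omega

theorem spiralBLoop_nil (fuel : Nat) (acc : List Char) : spiralBLoop fuel [] acc = acc := by
  cases fuel <;> rfl

theorem pvGrid_rot (f : Int → Char) (a dr dc : Int) (m n : Nat) (hm : 1 ≤ m) :
    rotCCW (pvGrid f a dr dc m n) = pvGrid f (a + ((n : Int) - 1) * dc) (-dc) dr n m := by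
  obtain ⟨m', rfl⟩ : ∃ m', m = m' + 1 := ⟨m - 1, by omega⟩
  have hcons : pvGrid f a dr dc (m' + 1) n
      = (List.range n).map (fun (j : Nat) => f (a + (0 : Int) * dr + (j : Int) * dc))
        :: (List.range m').map (fun (i : Nat) => (List.range n).map (fun (j : Nat) => f (a + ((i : Int) + 1) * dr + (j : Int) * dc))) := by
    simp [pvGrid, List.range_succ_eq_map, List.map_map, Function.comp]
  rw [hcons, rotCCW]
  simp only [List.length_map, List.length_range]
  rw [← hcons]
  unfold pvGrid
  apply List.map_congr_left
  intro k hk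
  rw [List.mem_range] at hk
  have hcast : ((n - 1 - k : Nat) : Int) = (n : Int) - 1 - (k : Int) := by omega
  rw [List.map_map]
  apply List.map_congr_left
  intro i _
  simp only [Function.comp]
  rw [PySem.List.getD_map_range _ _ _ _ (by omega)]
  congr 1
  rw [hcast]; ring

theorem pvGrid_cons (f : Int → Char) (a dr dc : Int) (m n : Nat) :
    pvGrid f a dr dc (m + 1) n
      = ((List.range n).map (fun (j : Nat) => f (a + (j : Int) * dc))) :: pvGrid f (a + dr) dr dc m n := by
  unfold pvGrid
  rw [List.range_succ_eq_map, List.map_cons, List.map_map]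
  congr 1
  · apply List.map_congr_left; intro j _; congr 1; push_cast; ring
  · apply List.map_congr_left; intro i _; simp only [Function.comp]
    apply List.map_congr_left; intro j _; congr 1; push_cast; ring

theorem pvGrid_zero_cols (f : Int → Char) (a dr dc : Int) (m : Nat) :
    rotCCW (pvGrid f a dr dc m 0) = [] := by
  cases m with
  | zero => rfl
  | succ m' => rw [pvGrid_cons]; simp [rotCCW]

theorem spiralB_grid (f : Int → Char) : ∀ (fuel m n : Nat) (a dr dc : Int) (acc : List Char),
    m + n ≤ fuel →
    spiralBLoop fuel (pvGrid f a dr dc m n) acc = acc ++ (pvSpiralIdx a dr dc m n).map f := by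
  intro fuel
  induction fuel with
  | zero =>
    intro m n a dr dc acc h
    have hm : m = 0 := by omega
    subst hm
    rw [pvSpiralIdx]
    simp [spiralBLoop]
  | succ fu ih =>
    intro m n a dr dc acc h
    match m with
    | 0 =>
      rw [pvSpiralIdx]
      simp [pvGrid, spiralBLoop]
    | m' + 1 =>
      rw [pvGrid_cons]
      show spiralBLoop fu (rotCCW (pvGrid f (a + dr) dr dc m' n)) (acc ++ _) = _
      by_cases hn : n = 0
      · subst hn
        rw [pvGrid_zero_cols, spiralBLoop_nil, pvSpiralIdx]
        simp
      · rw [pvSpiralIdx]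
        simp only [hn, or_false]
        cases Nat.eq_zero_or_pos m' with
        | inl hm0 =>
          subst hm0
          show spiralBLoop fu (rotCCW []) _ = _
          rw [show rotCCW [] = ([] : List (List Char)) from rfl, spiralBLoop_nil]
          rw [pvSpiralIdx]
          simp [List.map_map]
        | inr hm1 =>
          rw [pvGrid_rot f (a + dr) dr dc m' n hm1]
          rw [ih n m' _ _ _ _ (by omega)]
          simp [List.map_map, List.append_assoc]

theorem pvGrid_lookup (f : Int → Char) (a dr dc : Int) (m n : Nat) (i j : Int)
    (hi0 : 0 ≤ i) (hi : i < m) (hj0 : 0 ≤ j) (hj : j < n) :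
    PySem.List.pyGetD (PySem.List.pyGetD (pvGrid f a dr dc m n) i []) j 'X'
      = f (a + i * dr + j * dc) := by
  have hlen : (pvGrid f a dr dc m n).length = m := by simp [pvGrid]
  rw [PySem.List.pyGetD_eq_getElem _ _ hi0 (by rw [hlen]; exact_mod_cast hi)]
  unfold pvGrid
  simp only [List.getElem_map, List.getElem_range]
  rw [PySem.List.pyGetD_eq_getElem _ _ hj0 (by simp; exact_mod_cast hj)]
  simp only [List.getElem_map, List.getElem_range]
  congr 2 <;> rw [Int.toNat_of_nonneg] <;> omega

theorem mapRange_ext {β : Type} (c1 c2 : Nat) (g1 g2 : Nat → β) (hc : c1 = c2)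
    (hg : ∀ k, k < c1 → g1 k = g2 k) :
    (List.range c1).map g1 = (List.range c2).map g2 := by
  subst hc
  apply List.map_congr_left
  intro k hk
  exact hg k (List.mem_range.mp hk)

theorem segRow (f : Int → Char) (R C : Nat) (r lo hi : Int)
    (hr0 : 0 ≤ r) (hr : r < R) (hlo : 0 ≤ lo) (hhi : hi ≤ C) :
    (PySem.List.pyRange lo hi 1).map
        (fun i => PySem.List.pyGetD (PySem.List.pyGetD (pvGrid f 0 (C : Int) 1 R C) r []) i 'X')
      = (List.range (hi - lo).toNat).map (fun (k : Nat) => f (r * C + lo + k)) := by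
  rw [PySem.List.pyRange_one, List.map_map]
  apply mapRange_ext _ _ _ _ rfl
  intro k hk
  simp only [Function.comp]
  rw [pvGrid_lookup f 0 (C : Int) 1 R C r (lo + k) hr0 hr (by omega) (by omega)]
  congr 1; ring

theorem segRowDown (f : Int → Char) (R C : Nat) (r hi lo : Int)
    (hr0 : 0 ≤ r) (hr : r < R) (hlo : -1 ≤ lo) (hhi : hi < C) :
    (PySem.List.pyRange hi lo (-1)).map
        (fun i => PySem.List.pyGetD (PySem.List.pyGetD (pvGrid f 0 (C : Int) 1 R C) r []) i 'X')
      = (List.range (hi - lo).toNat).map (fun (k : Nat) => f (r * C + hi - k)) := by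
  rw [PySem.List.pyRange_neg_one, List.map_map]
  apply mapRange_ext _ _ _ _ rfl
  intro k hk
  simp only [Function.comp]
  rw [pvGrid_lookup f 0 (C : Int) 1 R C r (hi - k) hr0 hr (by omega) (by omega)]
  congr 1; ring

theorem segCol (f : Int → Char) (R C : Nat) (c lo hi : Int)
    (hc0 : 0 ≤ c) (hc : c < C) (hlo : 0 ≤ lo) (hhi : hi ≤ R) :
    (PySem.List.pyRange lo hi 1).map
        (fun i => PySem.List.pyGetD (PySem.List.pyGetD (pvGrid f 0 (C : Int) 1 R C) i []) c 'X')
      = (List.range (hi - lo).toNat).map (fun (k : Nat) => f ((lo + k) * C + c)) := by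
  rw [PySem.List.pyRange_one, List.map_map]
  apply mapRange_ext _ _ _ _ rfl
  intro k hk
  simp only [Function.comp]
  rw [pvGrid_lookup f 0 (C : Int) 1 R C (lo + k) c (by omega) (by omega) hc0 hc]
  congr 1; ring

theorem segColDown (f : Int → Char) (R C : Nat) (c hi lo : Int)
    (hc0 : 0 ≤ c) (hc : c < C) (hlo : -1 ≤ lo) (hhi : hi < R) :
    (PySem.List.pyRange hi lo (-1)).map
        (fun i => PySem.List.pyGetD (PySem.List.pyGetD (pvGrid f 0 (C : Int) 1 R C) i []) c 'X')
      = (List.range (hi - lo).toNat).map (fun (k : Nat) => f ((hi - k) * C + c)) := by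
  rw [PySem.List.pyRange_neg_one, List.map_map]
  apply mapRange_ext _ _ _ _ rfl
  intro k hk
  simp only [Function.comp]
  rw [pvGrid_lookup f 0 (C : Int) 1 R C (hi - k) c (by omega) (by omega) hc0 hc]
  congr 1; ring

theorem mem_pvSpiralIdx_fuel : ∀ (K m n : Nat) (a dr dc x : Int), m + n ≤ K →
    x ∈ pvSpiralIdx a dr dc m n →
    ∃ i j : Int, 0 ≤ i ∧ i < m ∧ 0 ≤ j ∧ j < n ∧ x = a + i * dr + j * dc := by
  intro K
  induction K with
  | zero =>
    intro m n a dr dc x h hx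
    have hm : m = 0 := by omega
    subst hm
    rw [pvSpiralIdx] at hx
    simp at hx
  | succ K ih =>
    intro m n a dr dc x h hx
    rw [pvSpiralIdx] at hx
    by_cases h0 : m = 0 ∨ n = 0
    · rw [if_pos h0] at hx; simp at hx
    · rw [if_neg h0] at hx
      rcases List.mem_append.mp hx with hl | hr
      · obtain ⟨j, hj, rfl⟩ := List.mem_map.mp hl
        rw [List.mem_range] at hj
        exact ⟨0, j, by omega, by omega, by omega, by exact_mod_cast hj, by ring⟩
      · obtain ⟨i', j', hi'0, hi', hj'0, hj', hx'⟩ := ih n (m - 1) _ _ _ _ (by omega) hr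
        refine ⟨j' + 1, (n : Int) - 1 - i', by omega, ?_, by omega, by omega, ?_⟩
        · have : (((m - 1 : Nat)) : Int) = (m : Int) - 1 := by omega
          omega
        · rw [hx']; ring

theorem pvSpiralIdx_unfold (a dr dc : Int) (m n : Nat) (hm : m ≠ 0) (hn : n ≠ 0) :
    pvSpiralIdx a dr dc m n
      = ((List.range n).map (fun (j : Nat) => a + (j : Int) * dc)) ++
        pvSpiralIdx (a + dr + ((n : Int) - 1) * dc) (-dc) dr n (m - 1) := by
  rw [pvSpiralIdx, if_neg (by omega)]

theorem pvSpiralIdx_nil (a dr dc : Int) (m n : Nat) (h : m = 0 ∨ n = 0) :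
    pvSpiralIdx a dr dc m n = [] := by
  rw [pvSpiralIdx, if_pos h]

theorem pvSpiralIdx_congr (a a' dr dr' dc dc' : Int) (m m' n n' : Nat)
    (ha : a = a') (hdr : dr = dr') (hdc : dc = dc') (hm : m = m') (hn : n = n') :
    pvSpiralIdx a dr dc m n = pvSpiralIdx a' dr' dc' m' n' := by
  subst ha hdr hdc hm hn; rfl

theorem spiralA_grid (f : Int → Char) (R C : Nat) : ∀ (fuel : Nat) (ust alt sol sag : Int)
    (acc : List Char), 0 ≤ ust → 0 ≤ sol → alt < R → sag < C →
    (alt - ust + 1).toNat ≤ fuel →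
    spiralALoop fuel (pvGrid f 0 (C : Int) 1 R C) ust alt sol sag acc
      = acc ++ (pvSpiralIdx (ust * C + sol) (C : Int) 1 (alt - ust + 1).toNat (sag - sol + 1).toNat).map f := by
  intro fuel
  induction fuel with
  | zero =>
    intro ust alt sol sag acc hu0 hs0 ha hg hf
    rw [pvSpiralIdx, if_pos (by omega)]
    simp [spiralALoop]
  | succ fu ih =>
    intro ust alt sol sag acc hu0 hs0 ha hg hf
    by_cases hcond : ust ≤ alt ∧ sol ≤ sag
    case neg =>
      rw [pvSpiralIdx, if_pos (by omega)]
      simp [spiralALoop, hcond]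
    case pos =>
      obtain ⟨hua, hss⟩ := hcond
      have hMc : (((alt - ust + 1).toNat : Nat) : Int) = alt - ust + 1 := by omega
      have hNc : (((sag - sol + 1).toNat : Nat) : Int) = sag - sol + 1 := by omega
      by_cases h2 : ust + 1 ≤ alt <;> by_cases h3 : sol ≤ sag - 1
      · -- full ring: mm ≥ 2, nn ≥ 2
        simp only [spiralALoop]
        rw [if_pos (show ust ≤ alt ∧ sol ≤ sag from ⟨hua, hss⟩)]
        simp only [if_pos h2, if_pos h3]
        rw [show ust + 1 - 1 = ust from by ring]
        rw [ih (ust+1) (alt-1) (sol+1) (sag-1) _ (by omega) (by omega) (by omega) (by omega) (by omega)]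
        rw [segRow f R C ust sol (sag+1) hu0 (by omega) hs0 (by omega)]
        rw [segCol f R C sag (ust+1) (alt+1) (by omega) hg (by omega) (by omega)]
        rw [segRowDown f R C alt (sag-1) (sol-1) (by omega) ha (by omega) (by omega)]
        rw [segColDown f R C sol (alt-1) ust hs0 (by omega) (by omega) (by omega)]
        conv_rhs => rw [pvSpiralIdx_unfold _ _ _ _ _ (by omega) (by omega)]
        conv_rhs => rw [pvSpiralIdx_unfold _ _ _ _ _ (by omega) (by omega)]
        conv_rhs => rw [pvSpiralIdx_unfold _ _ _ _ _ (by omega) (by omega)]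
        have cN1 : ((((sag - sol + 1).toNat - 1 : Nat)) : Int) = sag - sol := by omega
        have cM1 : ((((alt - ust + 1).toNat - 1 : Nat)) : Int) = alt - ust := by omega
        have cM2 : ((((alt - ust + 1).toNat - 1 - 1 : Nat)) : Int) = alt - ust - 1 := by omega
        by_cases h4 : ust + 2 ≤ alt
        · conv_rhs => rw [pvSpiralIdx_unfold _ _ _ _ _ (by omega) (by omega)]
          simp only [hNc, cN1, cM1, cM2, List.map_append, List.map_map]
          simp only [← List.append_assoc]
          congr 1
          · congr 1
            · congr 1
              · congr 1
                · congr 1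
                  apply mapRange_ext _ _ _ _ (by omega)
                  intro k hk; simp only [Function.comp]; congr 1; ring
                · apply mapRange_ext _ _ _ _ (by omega)
                  intro k hk; simp only [Function.comp]; congr 1; ring
              · apply mapRange_ext _ _ _ _ (by omega)
                intro k hk; simp only [Function.comp]; congr 1; ring
            · apply mapRange_ext _ _ _ _ (by omega)
              intro k hk; simp only [Function.comp]; congr 1; ring
          · congr 1
            apply pvSpiralIdx_congr <;> first | omega | ring
        · conv_rhs => rw [pvSpiralIdx_nil _ _ _ _ _ (by omega)]
          rw [pvSpiralIdx_nil _ _ _ _ _ (by omega)]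
          simp only [hNc, cN1, cM1, List.map_append, List.map_map, List.map_nil,
            show (alt - 1 - ust).toNat = 0 from by omega, List.range_zero, List.append_nil]
          simp only [← List.append_assoc]
          congr 1
          · congr 1
            · congr 1
              apply mapRange_ext _ _ _ _ (by omega)
              intro k hk; simp only [Function.comp]; congr 1; ring
            · apply mapRange_ext _ _ _ _ (by omega)
              intro k hk; simp only [Function.comp]; congr 1; ring
          · apply mapRange_ext _ _ _ _ (by omega)
            intro k hk; simp only [Function.comp]; congr 1; ring
      · -- mm ≥ 2, nn = 1
        have hgs : sag = sol := by omega
        simp only [spiralALoop]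
        rw [if_pos (show ust ≤ alt ∧ sol ≤ sag from ⟨hua, hss⟩)]
        simp only [if_pos h2, if_neg h3]
        rw [ih (ust+1) (alt-1) sol (sag-1) _ (by omega) (by omega) (by omega) (by omega) (by omega)]
        rw [segRow f R C ust sol (sag+1) hu0 (by omega) hs0 (by omega)]
        rw [segCol f R C sag (ust+1) (alt+1) (by omega) hg (by omega) (by omega)]
        rw [segRowDown f R C alt (sag-1) (sol-1) (by omega) ha (by omega) (by omega)]
        rw [pvSpiralIdx_nil _ _ _ _ _ (by omega)]
        conv_rhs => rw [pvSpiralIdx_unfold _ _ _ _ _ (by omega) (by omega)]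
        conv_rhs => rw [pvSpiralIdx_unfold _ _ _ _ _ (by omega) (by omega)]
        conv_rhs => rw [pvSpiralIdx_nil _ _ _ _ _ (by omega)]
        simp only [hNc, List.map_append, List.map_map, List.map_nil, List.append_nil,
          show (sag - 1 - (sol - 1)).toNat = 0 from by omega, List.range_zero]
        simp only [← List.append_assoc]
        congr 1
        · congr 1
          apply mapRange_ext _ _ _ _ (by omega)
          intro k hk; simp only [Function.comp]; congr 1; ring
        · apply mapRange_ext _ _ _ _ (by omega)
          intro k hk; simp only [Function.comp]; congr 1; ring
      · -- mm = 1, nn ≥ 2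
        have hau : alt = ust := by omega
        simp only [spiralALoop]
        rw [if_pos (show ust ≤ alt ∧ sol ≤ sag from ⟨hua, hss⟩)]
        simp only [if_neg h2, if_pos h3]
        rw [show ust + 1 - 1 = ust from by ring]
        rw [PySem.List.pyRange_neg_one_eq_nil (by omega : alt ≤ ust)]
        rw [PySem.List.pyRange_one_eq_nil (by omega : alt + 1 ≤ ust + 1)]
        rw [ih (ust+1) alt (sol+1) (sag-1) _ (by omega) (by omega) (by omega) (by omega) (by omega)]
        rw [segRow f R C ust sol (sag+1) hu0 (by omega) hs0 (by omega)]
        rw [pvSpiralIdx_nil _ _ _ _ _ (by omega)]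
        conv_rhs => rw [pvSpiralIdx_unfold _ _ _ _ _ (by omega) (by omega)]
        conv_rhs => rw [pvSpiralIdx_nil _ _ _ _ _ (by omega)]
        simp only [List.map_append, List.map_map, List.map_nil, List.append_nil]
        congr 1
        apply mapRange_ext _ _ _ _ (by omega)
        intro k hk; simp only [Function.comp]; congr 1; ring
      · -- mm = 1, nn = 1
        have hau : alt = ust := by omega
        simp only [spiralALoop]
        rw [if_pos (show ust ≤ alt ∧ sol ≤ sag from ⟨hua, hss⟩)]
        simp only [if_neg h2, if_neg h3]
        rw [PySem.List.pyRange_one_eq_nil (by omega : alt + 1 ≤ ust + 1)]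
        rw [ih (ust+1) alt sol (sag-1) _ (by omega) (by omega) (by omega) (by omega) (by omega)]
        rw [segRow f R C ust sol (sag+1) hu0 (by omega) hs0 (by omega)]
        rw [pvSpiralIdx_nil _ _ _ _ _ (by omega)]
        conv_rhs => rw [pvSpiralIdx_unfold _ _ _ _ _ (by omega) (by omega)]
        conv_rhs => rw [pvSpiralIdx_nil _ _ _ _ _ (by omega)]
        simp only [List.map_append, List.map_map, List.map_nil, List.append_nil]
        congr 1
        apply mapRange_ext _ _ _ _ (by omega)
        intro k hk; simp only [Function.comp]; congr 1; ring

theorem buildInner (m : List Char) : ∀ (C : Nat) (idx : Int) (s0 : List Char), 0 ≤ idx →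
    idx + C ≤ (m.length : Int) →
    (PySem.List.pyRange 0 (C : Int) 1).foldl
      (fun (st2 : List Char × Int) _j =>
        if st2.2 < (m.length : Int) then (st2.1 ++ [PySem.List.pyGetD m st2.2 'X'], st2.2 + 1)
        else (st2.1 ++ ['X'], st2.2)) (s0, idx)
    = (s0 ++ (List.range C).map (fun (j : Nat) => m.getD (idx.toNat + j) 'X'), idx + C) := by
  intro C
  induction C with
  | zero =>
    intro idx s0 h0 hlen
    simp [PySem.List.pyRange_one_eq_nil]
  | succ C ihc =>
    intro idx s0 h0 hlen
    rw [show ((C + 1 : Nat) : Int) = (C : Int) + 1 from by push_cast; ring]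
    rw [PySem.List.pyRange_one_succ_right (by omega)]
    rw [List.foldl_append]
    rw [ihc idx s0 h0 (by omega)]
    simp only [List.foldl_cons, List.foldl_nil]
    rw [if_pos (by omega)]
    rw [PySem.List.pyGetD_eq_getElem _ _ (by omega) (by omega)]
    rw [List.range_succ, List.map_append, List.map_singleton]
    rw [List.getD_eq_getElem _ _ (by omega)]
    refine Prod.ext ?_ (by omega)
    simp only [List.append_assoc]
    simp [show (idx + (C : Int)).toNat = idx.toNat + C from by omega]

theorem buildOuter (m : List Char) (C : Nat) : ∀ (R : Nat), R * C ≤ m.length →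
    (PySem.List.pyRange 0 (R : Int) 1).foldl
      (fun (st : List (List Char) × Int) _i =>
        let inner := (PySem.List.pyRange 0 (C : Int) 1).foldl
          (fun (st2 : List Char × Int) _j =>
            if st2.2 < (m.length : Int) then (st2.1 ++ [PySem.List.pyGetD m st2.2 'X'], st2.2 + 1)
            else (st2.1 ++ ['X'], st2.2)) ([], st.2)
        (st.1 ++ [inner.1], inner.2)) ([], (0 : Int))
    = (pvGrid (fun t => m.getD t.toNat 'X') 0 (C : Int) 1 R C, ((R * C : Nat) : Int)) := by
  intro R
  induction R with
  | zero =>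
    intro h
    simp [PySem.List.pyRange_one_eq_nil, pvGrid]
  | succ R ihr =>
    intro h
    rw [show ((R + 1 : Nat) : Int) = (R : Int) + 1 from by push_cast; ring]
    rw [PySem.List.pyRange_one_succ_right (by omega)]
    rw [List.foldl_append]
    rw [Nat.succ_mul] at h
    rw [ihr (by omega)]
    simp only [List.foldl_cons, List.foldl_nil]
    rw [buildInner m C _ [] (Int.natCast_nonneg _) (by exact_mod_cast h)]
    refine Prod.ext ?_ (by push_cast; ring)
    simp only [List.nil_append]
    unfold pvGrid
    rw [List.range_succ, List.map_append, List.map_singleton]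
    congr 1
    congr 1
    apply mapRange_ext _ _ _ _ rfl
    intro j hj
    simp only
    rw [show ((0:Int) + (R:Int)*(C:Int) + (j:Int)*1) = ((R*C + j : Nat) : Int) from by push_cast; ring]
    rw [Int.toNat_natCast, Int.toNat_natCast]

theorem chunk (L : List Char) (C s : Nat) (h : s + C ≤ L.length) :
    (L.drop s).take C = (List.range C).map (fun (j : Nat) => L.getD (s + j) 'X') := by
  apply List.ext_getElem
  · simp; omega
  · intro j h1 h2
    simp only [List.length_take, List.length_drop] at h1
    simp only [List.getElem_take, List.getElem_drop, List.getElem_map, List.getElem_range]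
    rw [List.getD_eq_getElem _ _ (by omega)]

theorem bMatrix (L : List Char) (R C : Nat) (hL : L.length = R * C) :
    (PySem.List.pyRange 0 (R : Int) 1).map
      (fun i => PySem.List.slice L (some (i * (C : Int))) (some ((i + 1) * (C : Int))))
    = pvGrid (fun t => L.getD t.toNat 'X') 0 (C : Int) 1 R C := by
  rw [PySem.List.pyRange_one, List.map_map]
  unfold pvGrid
  apply mapRange_ext _ _ _ _ (by omega)
  intro i hi
  simp only [Function.comp]
  rw [show ((0 : Int) + (i : Int)) * (C : Int) = ((i * C : Nat) : Int) from by push_cast; ring]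
  rw [show ((0 : Int) + (i : Int) + 1) * (C : Int) = ((i * C + C : Nat) : Int) from by push_cast; ring]
  rw [PySem.List.slice_natCast]
  rw [show i * C + C - i * C = C from by omega]
  rw [chunk L C (i * C) (by calc i * C + C = (i+1) * C := by ring
                              _ ≤ R * C := Nat.mul_le_mul_right _ (by omega)
                              _ = L.length := hL.symm)]
  apply mapRange_ext _ _ _ _ rfl
  intro j hj
  rw [show ((0:Int) + (i : Int) * (C : Int) + (j : Int) * 1) = ((i * C + j : Nat) : Int) from by push_cast; ring]
  simp only [Int.toNat_natCast]

theorem padAgree (metinL : List Char) (T k : Nat) (hk : k < T) :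
    (if (T : Int) - (metinL.length : Int) > 0 then
        metinL ++ List.replicate ((T : Int) - (metinL.length : Int)).toNat 'X' else metinL).getD k 'X'
    = ((metinL ++ List.replicate T 'X').take T).getD k 'X' := by
  simp only [List.getD_eq_getElem?_getD, List.getElem?_take, if_pos hk]
  by_cases hlt : k < metinL.length
  · rw [List.getElem?_append_left hlt]
    split
    · rw [List.getElem?_append_left hlt]
    · rfl
  · rw [List.getElem?_append_right (by omega)]
    rw [if_pos (show (T : Int) - (metinL.length : Int) > 0 from by omega)]
    rw [List.getElem?_append_right (by omega)]
    simp only [List.getElem?_replicate]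
    rw [if_pos (by omega), if_pos (by omega)]

theorem spiralALoop_stop (fuel : Nat) (M : List (List Char)) (u a s g : Int) (acc : List Char)
    (h : ¬ (u ≤ a ∧ s ≤ g)) : spiralALoop fuel M u a s g acc = acc := by
  cases fuel with
  | zero => rfl
  | succ fu => simp [spiralALoop, h]

theorem mem_pvSpiralIdx (m n : Nat) (a dr dc x : Int) (hx : x ∈ pvSpiralIdx a dr dc m n) :
    ∃ i j : Int, 0 ≤ i ∧ i < m ∧ 0 ≤ j ∧ j < n ∧ x = a + i * dr + j * dc :=
  mem_pvSpiralIdx_fuel (m + n) m n a dr dc x le_rfl hx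

theorem spiralIdx_bound (R C : Nat) (x : Int) (hx : x ∈ pvSpiralIdx 0 (C : Int) 1 R C) :
    0 ≤ x ∧ x < ((R * C : Nat) : Int) := by
  obtain ⟨i, j, hi0, hi, hj0, hj, rfl⟩ := mem_pvSpiralIdx R C 0 (C : Int) 1 x hx
  constructor
  · have : 0 ≤ i * (C : Int) := mul_nonneg hi0 (by positivity)
    omega
  · push_cast
    nlinarith [hi, hj, hi0, hj0]

theorem route_sifrele_spec' : ∀ (metin : String) (satir_sayisi : Int) (sutun_sayisi : Int),
    route_sifrele metin satir_sayisi sutun_sayisi = route_sifrele_alt metin satir_sayisi sutun_sayisi := by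
  intro metin satir sutun
  by_cases hpos : satir ≤ 0 ∨ sutun ≤ 0
  · simp only [route_sifrele, route_sifrele_alt, if_pos hpos]
    rw [spiralALoop_stop ((satir + sutun).toNat) _ 0 (satir - 1) 0 (sutun - 1) [] (by omega)]
  · push_neg at hpos
    obtain ⟨R, hR⟩ : ∃ R : Nat, (R : Int) = satir := ⟨satir.toNat, by omega⟩
    obtain ⟨C, hC⟩ : ∃ C : Nat, (C : Int) = sutun := ⟨sutun.toNat, by omega⟩
    subst hR hC
    simp only [route_sifrele, route_sifrele_alt, if_neg (show ¬ ((R : Int) ≤ 0 ∨ (C : Int) ≤ 0) from by omega)]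
    simp only [show (R : Int) * (C : Int) = ((R * C : Nat) : Int) from by push_cast; ring,
      Int.toNat_natCast]
    rw [buildOuter (if ((R * C : Nat) : Int) - (metin.toList.length : Int) > 0 then
        metin.toList ++ List.replicate (((R * C : Nat) : Int) - (metin.toList.length : Int)).toNat 'X'
      else metin.toList) C R
      (by split_ifs with hpad <;> (try simp only [List.length_append, List.length_replicate]) <;> omega)]
    rw [spiralA_grid _ R C _ 0 ((R : Int) - 1) 0 ((C : Int) - 1) [] le_rfl le_rfl
      (by omega) (by omega) (by omega)]
    rw [PySem.List.slice_to_natCast]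
    rw [bMatrix ((metin.toList ++ List.replicate (R * C) 'X').take (R * C)) R C
      (by simp only [List.length_take, List.length_append, List.length_replicate]; omega)]
    rw [spiralB_grid _ _ R C 0 (C : Int) 1 [] (by omega)]
    simp only [List.nil_append]
    rw [show ((0 : Int) * (C : Int) + 0) = 0 from by ring]
    rw [show ((R : Int) - 1 - 0 + 1).toNat = R from by omega]
    rw [show ((C : Int) - 1 - 0 + 1).toNat = C from by omega]
    congr 1
    apply List.map_congr_left
    intro x hxm
    obtain ⟨hx0, hxT⟩ := spiralIdx_bound R C x hxm
    exact padAgree metin.toList (R * C) x.toNat (by omega)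

-- ===== VERDICT (by name: the statement is the Claim_ definition above) =====
theorem route_sifrele_spec : Claim_equal_route_sifrele := by
  intro metin satir_sayisi sutun_sayisi _
  exact route_sifrele_spec' metin satir_sayisi sutun_sayisi
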